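-- pv_equiv track=rewrite | github.com/hursitti/personalprojecteulersolutions | problem66.py | getLowestM
-- ===== SOURCE A (Python) =====
-- def getLowestM (a, b, k, n, choosePositive=True):
--     currM = 1
--     greaterThanMFound = False
--     retM = []
--     absK = abs(k)
--     while not greaterThanMFound:
--         currMSquared = currM * currM
--         if ((a + (b*currM)) % absK == 0 and ((not choosePositive) or currMSquared >= n)):
--             retM.append((currM, abs((currMSquared)-n)))
--             if (currMSquared >= n):
--                 greaterThanMFound = True
--         currM += 1
--     return min(retM, key = lambda tup : tup[1])[0]
-- ===== SOURCE B (Python) =====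
-- def _xgcd(x, y):
--     # returns (g, u) with g = gcd(x, y) > 0 (for y > 0) and x*u + y*t = g for some t
--     old_r, r = x, y
--     old_s, s = 1, 0
--     while r > 0:
--         q = old_r // r
--         old_r, r = r, old_r - q * r
--         old_s, s = s, old_s - q * s
--     return old_r, old_s
--
--
-- def _isqrt(x):
--     # floor square root of x >= 0 by binary search
--     lo, hi = 0, x
--     while lo < hi:
--         mid = (lo + hi + 1) // 2
--         if mid * mid <= x:
--             lo = mid
--         else:
--             hi = mid - 1
--     return lo
--
--
-- def getLowestM(a, b, k, n, choosePositive=True):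
--     K = abs(k)
--     g, u = _xgcd(b, K)
--     P = K // g
--     # smallest positive m with (a + b*m) % K == 0
--     m0 = (-(a // g) * u - 1) % P + 1
--     # smallest positive integer s with s*s >= n
--     s = 1 if n <= 1 else _isqrt(n - 1) + 1
--     # smallest progression term mhi = m0 + j*P with mhi*mhi >= n
--     mhi = m0 if m0 >= s else m0 + P * ((s - m0 + P - 1) // P)
--     if choosePositive or mhi == m0:
--         return mhi
--     mlo = mhi - P
--     return mlo if n - mlo * mlo <= mhi * mhi - n else mhi
-- ===== Notes on version B (the rewrite author's own statement) =====
-- stated objective: faster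
-- what changed: A scans m = 1,2,3,... testing the congruence (a+b*m) % |k| == 0 on every integer until it passes sqrt(n); B solves the congruence once with the extended Euclidean algorithm, getting the least positive solution m0 and period P, and jumps directly (binary-search integer sqrt + one ceiling division) to the two progression terms straddling sqrt(n).
import Mathlib
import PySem

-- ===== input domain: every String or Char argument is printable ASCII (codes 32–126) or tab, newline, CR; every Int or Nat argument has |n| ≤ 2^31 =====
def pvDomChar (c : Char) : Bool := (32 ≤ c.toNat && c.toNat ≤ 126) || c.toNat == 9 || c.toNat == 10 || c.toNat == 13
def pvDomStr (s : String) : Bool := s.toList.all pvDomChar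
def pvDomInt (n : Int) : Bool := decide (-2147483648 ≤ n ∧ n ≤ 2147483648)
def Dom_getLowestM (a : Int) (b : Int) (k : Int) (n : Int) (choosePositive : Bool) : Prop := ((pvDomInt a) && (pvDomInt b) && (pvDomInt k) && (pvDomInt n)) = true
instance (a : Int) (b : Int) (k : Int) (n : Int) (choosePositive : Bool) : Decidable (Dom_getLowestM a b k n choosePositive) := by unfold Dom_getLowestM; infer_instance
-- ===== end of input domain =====

-- B replaces A's unit-step scan for congruent m by an extended-gcd solution of the
-- congruence plus a direct jump (integer sqrt + ceiling division) to the two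
-- progression terms straddling sqrt(n): an asymptotically faster exact algorithm.


-- ===== PORT A =====
-- A's while loop, with a fuel counter (2^33 steps suffice for every input in
-- Dom ∧ Pre_, as the proofs below establish; on fuel exhaustion it returns the
-- accumulated list, a case the claim never reaches).
def loopA (a : Int) (b : Int) (absK : Int) (n : Int) (cp : Bool) :
    Nat → Int → List (Int × Int) → List (Int × Int)
  | 0, _, retM => retM
  | fuel+1, currM, retM =>
    let sq := currM * currM
    match PySem.Int.mod? (a + b * currM) absK with
    | none => retM  -- '%' by zero raises ZeroDivisionError in Python (k = 0; outside Pre_)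
    | some md =>
      if md = 0 ∧ (cp = false ∨ n ≤ sq) then
        let retM' := retM ++ [(currM, |sq - n|)]
        if n ≤ sq then retM' else loopA a b absK n cp fuel (currM + 1) retM'
      else loopA a b absK n cp fuel (currM + 1) retM

def getLowestM (a : Int) (b : Int) (k : Int) (n : Int) (choosePositive : Bool) : Int :=
  let absK := |k|
  let retM := loopA a b absK n choosePositive (2 ^ 33) 1 []
  match PySem.List.min? retM (fun tup => tup.2) with
  | some tup => tup.1
  | none => 0   -- min([]) raises in Python; unreachable under Pre_

-- ===== PORT B =====
-- Source B's _xgcd loop: returns (g, u) with g = gcd, b*u + K*t = g.  The Nat argument is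
-- a fuel counter making the recursion structural (kernel-reducible); r.toNat + 1 fuel
-- always suffices since the remainder strictly decreases, so the 0-fuel arm is unreachable.
def xgcdLoop : Nat → Int → Int → Int → Int → Int × Int
  | 0, oldr, _, olds, _ => (oldr, olds)
  | fuel+1, oldr, r, olds, s =>
    if 0 < r then
      xgcdLoop fuel r (oldr - PySem.Int.floordiv oldr r * r) s
        (olds - PySem.Int.floordiv oldr r * s)
    else (oldr, olds)

-- Source B's _isqrt binary-search loop, same fuel device (the interval shrinks every step)
def isqrtLoop : Nat → Int → Int → Int → Int
  | 0, _, lo, _ => lo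
  | fuel+1, x, lo, hi =>
    if lo < hi then
      if PySem.Int.floordiv (lo + hi + 1) 2 * PySem.Int.floordiv (lo + hi + 1) 2 ≤ x then
        isqrtLoop fuel x (PySem.Int.floordiv (lo + hi + 1) 2) hi
      else isqrtLoop fuel x lo (PySem.Int.floordiv (lo + hi + 1) 2 - 1)
    else lo

-- Source B's locals, one definition per line of Source B
def pvXg (b : Int) (K : Int) : Int × Int := xgcdLoop (K.toNat + 1) b K 1 0
def pvP (b : Int) (K : Int) : Int := PySem.Int.floordiv K (pvXg b K).1
def pvM0 (a : Int) (b : Int) (K : Int) : Int :=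
  PySem.Int.mod (-(PySem.Int.floordiv a (pvXg b K).1) * (pvXg b K).2 - 1) (pvP b K) + 1
def pvS (n : Int) : Int := if n ≤ 1 then 1 else isqrtLoop ((n - 1).toNat + 1) (n - 1) 0 (n - 1) + 1
def pvMhi (a : Int) (b : Int) (K : Int) (n : Int) : Int :=
  if pvS n ≤ pvM0 a b K then pvM0 a b K
  else pvM0 a b K + pvP b K * PySem.Int.floordiv (pvS n - pvM0 a b K + pvP b K - 1) (pvP b K)

def getLowestM_alt (a : Int) (b : Int) (k : Int) (n : Int) (choosePositive : Bool) : Int :=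
  let K := |k|
  let mhi := pvMhi a b K n
  if choosePositive || (mhi == pvM0 a b K) then mhi
  else
    let mlo := mhi - pvP b K
    if n - mlo * mlo ≤ mhi * mhi - n then mlo else mhi

-- ===== PRECONDITION & SPEC =====
-- Pre_ excludes exactly the inputs where A returns no value: k = 0 (ZeroDivisionError
-- at '% abs(k)') and the inputs where gcd(b,k) does not divide a, on which the
-- congruence (a + b*m) % |k| == 0 has no solution and A's while loop never terminates.
def Pre_getLowestM (a : Int) (b : Int) (k : Int) (n : Int) (choosePositive : Bool) : Prop :=
  k ≠ 0 ∧ (Int.gcd b k : Int) ∣ a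
instance (a : Int) (b : Int) (k : Int) (n : Int) (choosePositive : Bool) : Decidable (Pre_getLowestM a b k n choosePositive) := by unfold Pre_getLowestM; infer_instance

def pvWitness_getLowestM : Int × Int × Int × Int × Bool := (4, 3, 5, 10, false)

def Spec_getLowestM (a : Int) (b : Int) (k : Int) (n : Int) (choosePositive : Bool) (out : Int) : Prop := out = getLowestM_alt a b k n choosePositive
instance (a : Int) (b : Int) (k : Int) (n : Int) (choosePositive : Bool) (out : Int) : Decidable (Spec_getLowestM a b k n choosePositive out) := by unfold Spec_getLowestM; infer_instance

-- ===== CLAIM (what is proved, stated in full; the proofs are below) =====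
def Claim_equal_getLowestM : Prop := ∀ (a : Int) (b : Int) (k : Int) (n : Int) (choosePositive : Bool), Dom_getLowestM a b k n choosePositive → Pre_getLowestM a b k n choosePositive → Spec_getLowestM a b k n choosePositive (getLowestM a b k n choosePositive)

-- ===== LEMMAS AND PROOFS =====

-- ----- extended gcd: the loop returns a positive common divisor with a Bezout certificate -----
lemma xgcdLoop_spec (b K : Int) : ∀ (fuel : Nat) (oldr r olds s t1 t2 : Int),
    r.toNat < fuel → 0 < r → oldr = b * olds + K * t1 → r = b * s + K * t2 →
    0 < (xgcdLoop fuel oldr r olds s).1 ∧ (xgcdLoop fuel oldr r olds s).1 ∣ oldr ∧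
      (xgcdLoop fuel oldr r olds s).1 ∣ r ∧
      ∃ t, (xgcdLoop fuel oldr r olds s).1 = b * (xgcdLoop fuel oldr r olds s).2 + K * t := by
  intro fuel
  induction fuel with
  | zero => intro oldr r olds s t1 t2 hN hr _ _; omega
  | succ N ih =>
    intro oldr r olds s t1 t2 hN hr h1 h2
    rw [xgcdLoop, if_pos hr]
    have hmod : oldr - PySem.Int.floordiv oldr r * r = PySem.Int.mod oldr r := by
      have := PySem.Int.floordiv_mul_add_mod oldr r; omega
    have hge : 0 ≤ oldr - PySem.Int.floordiv oldr r * r := by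
      rw [hmod]; exact PySem.Int.mod_nonneg oldr hr
    have hlt : oldr - PySem.Int.floordiv oldr r * r < r := by
      rw [hmod]; exact PySem.Int.mod_lt oldr hr
    by_cases hr' : 0 < oldr - PySem.Int.floordiv oldr r * r
    · have H := ih r (oldr - PySem.Int.floordiv oldr r * r) s
        (olds - PySem.Int.floordiv oldr r * s) t2 (t1 - PySem.Int.floordiv oldr r * t2)
        (by omega) hr' h2 (by rw [h1, h2]; ring)
      refine ⟨H.1, ?_, H.2.1, H.2.2.2⟩
      have h5 := dvd_add (Dvd.dvd.mul_left H.2.1 (PySem.Int.floordiv oldr r)) H.2.2.1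
      have heq : PySem.Int.floordiv oldr r * r + (oldr - PySem.Int.floordiv oldr r * r) =
          oldr := by ring
      rwa [heq] at h5
    · have hz : oldr - PySem.Int.floordiv oldr r * r = 0 := by omega
      have hdo : r ∣ oldr := ⟨PySem.Int.floordiv oldr r, by linear_combination hz⟩
      cases N with
      | zero =>
        rw [xgcdLoop]
        exact ⟨hr, hdo, dvd_refl r, t2, h2⟩
      | succ M =>
        rw [xgcdLoop, if_neg (by omega)]
        exact ⟨hr, hdo, dvd_refl r, t2, h2⟩

lemma xgcd_props (b K : Int) (hK : 0 < K) :
    0 < (pvXg b K).1 ∧ (pvXg b K).1 ∣ b ∧ (pvXg b K).1 ∣ K ∧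
      ∃ t, (pvXg b K).1 = b * (pvXg b K).2 + K * t :=
  xgcdLoop_spec b K (K.toNat + 1) b K 1 0 0 1 (by omega) hK (by ring) (by ring)

lemma pvP_mul (b K : Int) (hK : 0 < K) : pvP b K * (pvXg b K).1 = K := by
  obtain ⟨hg, _, hgK, _⟩ := xgcd_props b K hK
  unfold pvP
  rw [PySem.Int.floordiv_eq_ediv_of_pos hg]
  exact Int.ediv_mul_cancel hgK

lemma pvP_pos (b K : Int) (hK : 0 < K) : 0 < pvP b K := by
  obtain ⟨hg, _, _, _⟩ := xgcd_props b K hK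
  have h := pvP_mul b K hK
  nlinarith

lemma pvP_le (b K : Int) (hK : 0 < K) : pvP b K ≤ K := by
  obtain ⟨hg, _, _, _⟩ := xgcd_props b K hK
  have h := pvP_mul b K hK
  have hP := pvP_pos b K hK
  nlinarith

-- abstract-variable helpers (g = the gcd the loop returned, P its cofactor, K = P*g)
lemma cop_helper (b g P K u t : Int) (hg : 0 < g) (hgb : g ∣ b)
    (hPK : P * g = K) (hbez : g = b * u + K * t) : IsCoprime P (b / g) := by
  subst hPK
  rw [Int.isCoprime_iff_gcd_eq_one]
  obtain ⟨b', hb'⟩ := hgb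
  have hdivb : b / g = b' := by rw [hb']; exact Int.mul_ediv_cancel_left b' (ne_of_gt hg)
  rw [hdivb]
  have hcP : (Int.gcd P b' : Int) ∣ P := Int.gcd_dvd_left P b'
  have hcb : (Int.gcd P b' : Int) ∣ b' := Int.gcd_dvd_right P b'
  obtain ⟨p', hp'⟩ := hcP
  obtain ⟨b'', hb''⟩ := hcb
  have h3 : g * (Int.gcd P b' : Int) ∣ g :=
    ⟨b'' * u + p' * t, by linear_combination hbez + u * hb' + ((g : Int) * u) * hb'' +
      ((g : Int) * t) * hp'⟩
  have h3' : g * (Int.gcd P b' : Int) ∣ g * 1 := by rwa [mul_one]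
  have h4 : (Int.gcd P b' : Int) ∣ 1 := (mul_dvd_mul_iff_left (ne_of_gt hg)).mp h3'
  have h5 : Int.gcd P b' ∣ 1 := by exact_mod_cast h4
  exact Nat.dvd_one.mp h5

lemma spacing_helper (a b g P K u t m m' : Int) (hg : 0 < g) (hgb : g ∣ b)
    (hPK : P * g = K) (hbez : g = b * u + K * t)
    (hm : K ∣ a + b * m) (hm' : K ∣ a + b * m') : P ∣ m - m' := by
  subst hPK
  obtain ⟨b', hb'⟩ := hgb
  have hKd : P * g ∣ b * (m - m') := by
    have heq : b * (m - m') = (a + b * m) - (a + b * m') := by ring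
    rw [heq]; exact dvd_sub hm hm'
  obtain ⟨c, hc⟩ := hKd
  have h1 : g * P ∣ g * (b' * (m - m')) := ⟨c, by linear_combination hc - (m - m') * hb'⟩
  have h2 : P ∣ b' * (m - m') := (mul_dvd_mul_iff_left (ne_of_gt hg)).mp h1
  have hcop : IsCoprime P (b / g) := cop_helper b g P (P * g) u t hg ⟨b', hb'⟩ rfl hbez
  have hdivb : b / g = b' := by rw [hb']; exact Int.mul_ediv_cancel_left b' (ne_of_gt hg)
  rw [hdivb] at hcop
  exact hcop.dvd_of_dvd_mul_left h2

lemma shift_helper (a b g P K m m' : Int) (hgb : g ∣ b) (hPK : P * g = K)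
    (hm : K ∣ a + b * m) (hd : P ∣ m' - m) : K ∣ a + b * m' := by
  subst hPK
  obtain ⟨b', hb'⟩ := hgb
  obtain ⟨c, hc⟩ := hd
  obtain ⟨e, he⟩ := hm
  exact ⟨e + b' * c, by linear_combination he + b * hc + (P * c) * hb'⟩

-- solutions of the congruence are spaced by exactly P
lemma sol_spacing (a b K : Int) (hK : 0 < K) (m m' : Int)
    (hm : K ∣ a + b * m) (hm' : K ∣ a + b * m') : pvP b K ∣ m - m' := by
  obtain ⟨hg, hgb, hgK, t, hbez⟩ := xgcd_props b K hK
  exact spacing_helper a b (pvXg b K).1 (pvP b K) K (pvXg b K).2 t m m' hg hgb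
    (pvP_mul b K hK) hbez hm hm'

lemma sol_shift (a b K : Int) (hK : 0 < K) (m m' : Int)
    (hm : K ∣ a + b * m) (hd : pvP b K ∣ m' - m) : K ∣ a + b * m' := by
  obtain ⟨hg, hgb, hgK, t, hbez⟩ := xgcd_props b K hK
  exact shift_helper a b (pvXg b K).1 (pvP b K) K m m' hgb (pvP_mul b K hK) hm hd

lemma pvM0_bounds (a b K : Int) (hK : 0 < K) :
    1 ≤ pvM0 a b K ∧ pvM0 a b K ≤ pvP b K := by
  have hP := pvP_pos b K hK
  unfold pvM0
  constructor
  · have := PySem.Int.mod_nonneg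
      (-(PySem.Int.floordiv a (pvXg b K).1) * (pvXg b K).2 - 1) hP
    omega
  · have := PySem.Int.mod_lt
      (-(PySem.Int.floordiv a (pvXg b K).1) * (pvXg b K).2 - 1) hP
    omega

lemma pvM0_sol (a b K : Int) (hK : 0 < K) (hga : (pvXg b K).1 ∣ a) :
    K ∣ a + b * pvM0 a b K := by
  obtain ⟨hg, hgb, hgK, t, hbez⟩ := xgcd_props b K hK
  obtain ⟨a', ha'⟩ := hga
  have hfd : PySem.Int.floordiv a (pvXg b K).1 = a' := by
    rw [PySem.Int.floordiv_eq_ediv_of_pos hg, ha']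
    exact Int.mul_ediv_cancel_left a' (ne_of_gt hg)
  have hx0 : K ∣ a + b * (-a' * (pvXg b K).2) := by
    refine ⟨a' * t, ?_⟩
    rw [ha']
    linear_combination a' * hbez
  have hdm : pvP b K ∣ pvM0 a b K - (-a' * (pvXg b K).2) := by
    have hfm := PySem.Int.floordiv_mul_add_mod (-a' * (pvXg b K).2 - 1) (pvP b K)
    refine ⟨-(PySem.Int.floordiv (-a' * (pvXg b K).2 - 1) (pvP b K)), ?_⟩
    unfold pvM0
    rw [hfd]
    linear_combination hfm
  exact sol_shift a b K hK (-a' * (pvXg b K).2) (pvM0 a b K) hx0 hdm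

lemma pvM0_least (a b K : Int) (hK : 0 < K) (hga : (pvXg b K).1 ∣ a)
    (m : Int) (h1 : 1 ≤ m) (hm : K ∣ a + b * m) : pvM0 a b K ≤ m := by
  have hsol0 := pvM0_sol a b K hK hga
  have hsp := sol_spacing a b K hK m (pvM0 a b K) hm hsol0
  have hb := pvM0_bounds a b K hK
  have hP := pvP_pos b K hK
  by_contra hlt
  push_neg at hlt
  have hvd : pvP b K ∣ -(m - pvM0 a b K) := dvd_neg.mpr hsp
  have hle := Int.le_of_dvd (by omega) hvd
  omega

-- ----- binary-search integer square root -----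
lemma isqrtLoop_spec (x : Int) : ∀ (fuel : Nat) (lo hi : Int),
    (hi - lo).toNat < fuel → lo ≤ hi → lo * lo ≤ x → x < (hi + 1) * (hi + 1) →
    lo ≤ isqrtLoop fuel x lo hi ∧ isqrtLoop fuel x lo hi ≤ hi ∧
      isqrtLoop fuel x lo hi * isqrtLoop fuel x lo hi ≤ x ∧
      x < (isqrtLoop fuel x lo hi + 1) * (isqrtLoop fuel x lo hi + 1) := by
  intro fuel
  induction fuel with
  | zero => intro lo hi hN hle hlo hhi; omega
  | succ N ih =>
    intro lo hi hN hle hlo hhi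
    by_cases hlh : lo < hi
    · rw [isqrtLoop, if_pos hlh]
      have hmb := PySem.Int.floordiv_two_mid_bounds (lo := lo + 1) (hi := hi) (by omega)
      have he : lo + 1 + hi = lo + hi + 1 := by ring
      rw [he] at hmb
      by_cases hsq : PySem.Int.floordiv (lo + hi + 1) 2 * PySem.Int.floordiv (lo + hi + 1) 2 ≤ x
      · rw [if_pos hsq]
        have H := ih (PySem.Int.floordiv (lo + hi + 1) 2) hi (by omega) (by omega) hsq hhi
        exact ⟨by omega, H.2.1, H.2.2.1, H.2.2.2⟩
      · rw [if_neg hsq]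
        push_neg at hsq
        have hup : x < (PySem.Int.floordiv (lo + hi + 1) 2 - 1 + 1) *
            (PySem.Int.floordiv (lo + hi + 1) 2 - 1 + 1) := by
          have heq2 : (PySem.Int.floordiv (lo + hi + 1) 2 - 1 + 1) *
              (PySem.Int.floordiv (lo + hi + 1) 2 - 1 + 1) =
              PySem.Int.floordiv (lo + hi + 1) 2 * PySem.Int.floordiv (lo + hi + 1) 2 := by
            ring
          rw [heq2]; exact hsq
        have H := ih lo (PySem.Int.floordiv (lo + hi + 1) 2 - 1) (by omega) (by omega) hlo hup
        exact ⟨H.1, by omega, H.2.2.1, H.2.2.2⟩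
    · rw [isqrtLoop, if_neg hlh]
      have heq : lo = hi := by omega
      subst heq
      exact ⟨le_rfl, le_rfl, hlo, hhi⟩

-- pvS n is the least positive integer whose square reaches n (with a Dom-size bound)
lemma pvS_props (n : Int) (hn : n ≤ 2147483649) :
    1 ≤ pvS n ∧ n ≤ pvS n * pvS n ∧ (∀ m, 1 ≤ m → m < pvS n → m * m < n) ∧
      pvS n ≤ 46342 := by
  unfold pvS
  by_cases h1 : n ≤ 1
  · rw [if_pos h1]
    exact ⟨le_rfl, by omega, fun m hm hmlt => by omega, by omega⟩
  · rw [if_neg h1]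
    push_neg at h1
    have H := isqrtLoop_spec (n - 1) ((n - 1).toNat + 1) 0 (n - 1) (by omega) (by omega) (by omega)
      (by nlinarith)
    obtain ⟨hr0, hrhi, hrsq, hrup⟩ := H
    refine ⟨by omega, by nlinarith, ?_, ?_⟩
    · intro m hm hmlt
      have hmr : m ≤ isqrtLoop ((n - 1).toNat + 1) (n - 1) 0 (n - 1) := by omega
      nlinarith
    · by_contra hbig
      push_neg at hbig
      nlinarith

-- pvMhi is the least positive solution of the congruence whose square reaches n
lemma pvMhi_props (a b K n : Int) (hK : 0 < K) (hga : (pvXg b K).1 ∣ a)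
    (hn : n ≤ 2147483649) :
    pvP b K ∣ pvMhi a b K n - pvM0 a b K ∧
    pvM0 a b K ≤ pvMhi a b K n ∧
    pvS n ≤ pvMhi a b K n ∧
    n ≤ pvMhi a b K n * pvMhi a b K n ∧
    K ∣ a + b * pvMhi a b K n ∧
    (∀ m, 1 ≤ m → K ∣ a + b * m → m < pvMhi a b K n → m * m < n) ∧
    pvMhi a b K n ≤ K + 46342 := by
  have hP := pvP_pos b K hK
  have hPle := pvP_le b K hK
  have hm0 := pvM0_bounds a b K hK
  have hsol0 := pvM0_sol a b K hK hga
  obtain ⟨hs1, hs2, hs3, hs4⟩ := pvS_props n hn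
  unfold pvMhi
  by_cases hcase : pvS n ≤ pvM0 a b K
  · rw [if_pos hcase]
    refine ⟨by rw [sub_self]; exact dvd_zero _, le_rfl, hcase, by nlinarith, hsol0, ?_, by omega⟩
    intro m hm1 hmsol hmlt
    exfalso
    have := pvM0_least a b K hK hga m hm1 hmsol
    omega
  · rw [if_neg hcase]
    push_neg at hcase
    have hfm := PySem.Int.floordiv_mul_add_mod (pvS n - pvM0 a b K + pvP b K - 1) (pvP b K)
    have hmod0 := PySem.Int.mod_nonneg (pvS n - pvM0 a b K + pvP b K - 1) hP
    have hmodlt := PySem.Int.mod_lt (pvS n - pvM0 a b K + pvP b K - 1) hP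
    have hq1 : pvS n - pvM0 a b K ≤
        PySem.Int.floordiv (pvS n - pvM0 a b K + pvP b K - 1) (pvP b K) * pvP b K := by
      linarith
    have hq2 : PySem.Int.floordiv (pvS n - pvM0 a b K + pvP b K - 1) (pvP b K) * pvP b K ≤
        pvS n - pvM0 a b K + pvP b K - 1 := by
      linarith
    have hsle : pvS n ≤ pvM0 a b K +
        pvP b K * PySem.Int.floordiv (pvS n - pvM0 a b K + pvP b K - 1) (pvP b K) := by
      have : pvP b K * PySem.Int.floordiv (pvS n - pvM0 a b K + pvP b K - 1) (pvP b K) =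
          PySem.Int.floordiv (pvS n - pvM0 a b K + pvP b K - 1) (pvP b K) * pvP b K := by ring
      linarith [this]
    have hdvd : pvP b K ∣ pvM0 a b K +
        pvP b K * PySem.Int.floordiv (pvS n - pvM0 a b K + pvP b K - 1) (pvP b K) -
        pvM0 a b K := ⟨PySem.Int.floordiv (pvS n - pvM0 a b K + pvP b K - 1) (pvP b K), by ring⟩
    have hsolmhi : K ∣ a + b * (pvM0 a b K +
        pvP b K * PySem.Int.floordiv (pvS n - pvM0 a b K + pvP b K - 1) (pvP b K)) :=
      sol_shift a b K hK (pvM0 a b K) _ hsol0 (by simpa using hdvd)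
    refine ⟨hdvd, by linarith, hsle, by nlinarith, hsolmhi, ?_, ?_⟩
    · intro m hm1 hmsol hmlt
      by_cases hms : m < pvS n
      · exact hs3 m hm1 hms
      · exfalso
        push_neg at hms
        have hm0le := pvM0_least a b K hK hga m hm1 hmsol
        have hspc := sol_spacing a b K hK m (pvM0 a b K) hmsol hsol0
        obtain ⟨c, hc⟩ := hspc
        have hcpos : 0 ≤ c := by nlinarith
        have hql : PySem.Int.floordiv (pvS n - pvM0 a b K + pvP b K - 1) (pvP b K) ≤ c := by
          by_contra hqc
          push_neg at hqc
          have : pvP b K * c ≤ pvP b K *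
              (PySem.Int.floordiv (pvS n - pvM0 a b K + pvP b K - 1) (pvP b K) - 1) := by
            apply mul_le_mul_of_nonneg_left (by omega) (le_of_lt hP)
          nlinarith
        have : pvP b K *
            PySem.Int.floordiv (pvS n - pvM0 a b K + pvP b K - 1) (pvP b K) ≤ pvP b K * c := by
          apply mul_le_mul_of_nonneg_left hql (le_of_lt hP)
        nlinarith
    · linarith

-- ----- characterisation of A's scan -----
-- the (m, |m*m-n|) entries A appends for m in [mhi-d, mhi), oldest first (proof-only)
def belowList (a b K n : Int) (cp : Bool) (mhi : Int) : Nat → List (Int × Int)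
  | 0 => []
  | d+1 =>
    (if K ∣ a + b * (mhi - ((d : Int) + 1)) ∧ cp = false then
        [(mhi - ((d : Int) + 1),
          |(mhi - ((d : Int) + 1)) * (mhi - ((d : Int) + 1)) - n|)]
      else []) ++ belowList a b K n cp mhi d

lemma loopA_run (a b K n : Int) (cp : Bool) (mhi : Int)
    (hK : 0 < K)
    (hsolhi : K ∣ a + b * mhi)
    (hsq : n ≤ mhi * mhi)
    (hmin : ∀ m, 1 ≤ m → K ∣ a + b * m → m < mhi → m * m < n) :
    ∀ (d : Nat) (fuel : Nat) (ret : List (Int × Int)), d < fuel → 1 ≤ mhi - (d : Int) →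
    loopA a b K n cp fuel (mhi - (d : Int)) ret =
      ret ++ belowList a b K n cp mhi d ++ [(mhi, |mhi * mhi - n|)] := by
  intro d
  induction d with
  | zero =>
    intro fuel ret hf h1
    obtain ⟨f, rfl⟩ : ∃ f, fuel = f + 1 := ⟨fuel - 1, by omega⟩
    have hmod0 : PySem.Int.mod (a + b * mhi) K = 0 :=
      (PySem.Int.mod_eq_zero_iff_dvd _ _).mpr hsolhi
    have hmq : ∀ X : Int, PySem.Int.mod? X K = some (PySem.Int.mod X K) := fun X => by
      simp [PySem.Int.mod?, PySem.Int.mod, hK.ne']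
    simp only [Nat.cast_zero, sub_zero, belowList, List.append_nil, loopA, hmq]
    rw [if_pos ⟨hmod0, Or.inr hsq⟩, if_pos hsq]
  | succ d ih =>
    intro fuel ret hf h1
    obtain ⟨f, rfl⟩ : ∃ f, fuel = f + 1 := ⟨fuel - 1, by omega⟩
    have hdc : ((d + 1 : Nat) : Int) = (d : Int) + 1 := by push_cast; ring
    rw [hdc] at h1 ⊢
    have hd0 : (0 : Int) ≤ (d : Int) := Int.natCast_nonneg d
    have hlt : mhi - ((d : Int) + 1) < mhi := by omega
    have hstep : mhi - ((d : Int) + 1) + 1 = mhi - (d : Int) := by ring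
    have hmq : ∀ X : Int, PySem.Int.mod? X K = some (PySem.Int.mod X K) := fun X => by
      simp [PySem.Int.mod?, PySem.Int.mod, hK.ne']
    simp only [loopA, belowList, hmq]
    by_cases hsol : K ∣ a + b * (mhi - ((d : Int) + 1))
    · have hsqlt : (mhi - ((d : Int) + 1)) * (mhi - ((d : Int) + 1)) < n :=
        hmin _ h1 hsol hlt
      have hmod0 : PySem.Int.mod (a + b * (mhi - ((d : Int) + 1))) K = 0 :=
        (PySem.Int.mod_eq_zero_iff_dvd _ _).mpr hsol
      cases cp with
      | false =>
        rw [if_pos ⟨hmod0, Or.inl rfl⟩, if_neg (not_le.mpr hsqlt), hstep,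
          ih f _ (by omega) (by omega), if_pos ⟨hsol, rfl⟩]
        simp [List.append_assoc]
      | true =>
        rw [if_neg (by intro hcon; exact hcon.2.elim (fun h => by simp at h) (fun h => absurd h (not_le.mpr hsqlt))),
          hstep, ih f _ (by omega) (by omega),
          if_neg (by rintro ⟨-, h⟩; simp at h)]
        simp
    · rw [if_neg (by rintro ⟨h, -⟩; exact hsol ((PySem.Int.mod_eq_zero_iff_dvd _ _).mp h)),
        hstep, ih f _ (by omega) (by omega),
        if_neg (by rintro ⟨h, -⟩; exact hsol h)]
      simp

lemma belowList_mem (a b K n : Int) (cp : Bool) (mhi : Int) :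
    ∀ (d : Nat) (p : Int × Int), p ∈ belowList a b K n cp mhi d →
      K ∣ a + b * p.1 ∧ mhi - (d : Int) ≤ p.1 ∧ p.1 < mhi ∧
        p.2 = |p.1 * p.1 - n| ∧ cp = false := by
  intro d
  induction d with
  | zero => intro p hp; simp [belowList] at hp
  | succ d ih =>
    intro p hp
    simp only [belowList, List.mem_append] at hp
    have hdc : ((d + 1 : Nat) : Int) = (d : Int) + 1 := by push_cast; ring
    rw [hdc]
    have hd0 : (0 : Int) ≤ (d : Int) := Int.natCast_nonneg d
    rcases hp with hp | hp
    · split_ifs at hp with hcond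
      · simp only [List.mem_singleton] at hp
        subst hp
        exact ⟨hcond.1, by omega, by omega, rfl, hcond.2⟩
      · simp at hp
    · obtain ⟨hq1, hq2, hq3, hq4, hq5⟩ := ih p hp
      exact ⟨hq1, by omega, hq3, hq4, hq5⟩

lemma belowList_cp_true (a b K n : Int) (mhi : Int) :
    ∀ d : Nat, belowList a b K n true mhi d = [] := by
  intro d
  induction d with
  | zero => rfl
  | succ d ih =>
    simp only [belowList, ih, List.append_nil]
    rw [if_neg (by rintro ⟨-, h⟩; simp at h)]

lemma belowList_pairwise (a b K n : Int) (cp : Bool) (mhi : Int) :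
    ∀ d : Nat, (belowList a b K n cp mhi d).Pairwise (fun p q => p.1 < q.1) := by
  intro d
  induction d with
  | zero => exact List.Pairwise.nil
  | succ d ih =>
    simp only [belowList]
    rw [List.pairwise_append]
    refine ⟨?_, ih, ?_⟩
    · split_ifs <;> simp
    · intro x hx y hy
      obtain ⟨-, hy1, -, -, -⟩ := belowList_mem a b K n cp mhi d y hy
      have hd0 : (0 : Int) ≤ (d : Int) := Int.natCast_nonneg d
      split_ifs at hx with hc
      · simp only [List.mem_singleton] at hx
        subst hx
        omega
      · simp at hx

lemma belowList_eq_nil (a b K n : Int) (cp : Bool) (mhi mlo : Int)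
    (hnos : ∀ m, K ∣ a + b * m → mlo < m → m < mhi → False) :
    ∀ d : Nat, mlo < mhi - (d : Int) → belowList a b K n cp mhi d = [] := by
  intro d
  induction d with
  | zero => intro _; rfl
  | succ d ih =>
    intro hlt
    have hdc : ((d + 1 : Nat) : Int) = (d : Int) + 1 := by push_cast; ring
    rw [hdc] at hlt
    have hd0 : (0 : Int) ≤ (d : Int) := Int.natCast_nonneg d
    simp only [belowList, ih (by omega), List.append_nil]
    rw [if_neg]
    rintro ⟨hsol, -⟩
    exact hnos _ hsol (by omega) (by omega)

lemma belowList_getLast? (a b K n : Int) (cp : Bool) (mhi mlo : Int)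
    (hsollo : K ∣ a + b * mlo) (hcp : cp = false) (hlo : mlo < mhi)
    (hnos : ∀ m, K ∣ a + b * m → mlo < m → m < mhi → False) :
    ∀ d : Nat, mhi - (d : Int) ≤ mlo →
    (belowList a b K n cp mhi d).getLast? = some (mlo, |mlo * mlo - n|) := by
  intro d
  induction d with
  | zero => intro hle; simp at hle; omega
  | succ d ih =>
    intro hle
    have hdc : ((d + 1 : Nat) : Int) = (d : Int) + 1 := by push_cast; ring
    rw [hdc] at hle
    have hd0 : (0 : Int) ≤ (d : Int) := Int.natCast_nonneg d
    by_cases heq : mhi - ((d : Int) + 1) = mlo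
    · have hrest : belowList a b K n cp mhi d = [] :=
        belowList_eq_nil a b K n cp mhi mlo hnos d (by omega)
      simp only [belowList, hrest, List.append_nil]
      rw [if_pos ⟨by rw [heq]; exact hsollo, hcp⟩, heq]
      rfl
    · have hprev := ih (by omega)
      simp only [belowList]
      rw [List.getLast?_append, hprev]
      rfl

-- ----- Python's min(..., key=λt. t[1]) as a fold keeping the first minimum -----
def minStep (acc : Option (Int × Int)) (x : Int × Int) : Option (Int × Int) :=
  match acc with
  | none => some x
  | some m => if x.2 < m.2 then some x else some m

lemma min?_eq_foldl_minStep (L : List (Int × Int)) :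
    PySem.List.min? L (fun tup => tup.2) = L.foldl minStep none := by
  unfold PySem.List.min?
  congr 1
  funext acc x
  cases acc <;> rfl

lemma foldl_minStep_some (L : List (Int × Int)) :
    ∀ bst : Int × Int, (bst :: L).Pairwise (fun p q => q.2 < p.2) →
    L.foldl minStep (some bst) = (bst :: L).getLast? := by
  induction L with
  | nil => intro bst _; rfl
  | cons x L ih =>
    intro bst hp
    have hx : x.2 < bst.2 := (List.pairwise_cons.mp hp).1 x (by simp)
    have hstep : minStep (some bst) x = some x := by simp [minStep, hx]
    rw [List.foldl_cons, hstep, ih x hp.of_cons, List.getLast?_cons_cons]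

lemma foldl_minStep_strict (L : List (Int × Int))
    (hp : L.Pairwise (fun p q => q.2 < p.2)) :
    L.foldl minStep none = L.getLast? := by
  cases L with
  | nil => rfl
  | cons x L =>
    rw [List.foldl_cons]
    exact foldl_minStep_some L x hp

-- ===== VERDICT (by name: the statement is the Claim_ definition above) =====
theorem getLowestM_spec : Claim_equal_getLowestM := by
  unfold Claim_equal_getLowestM
  intro a b k n cp hDom hPre
  unfold Spec_getLowestM
  obtain ⟨hk0, hgcd⟩ := hPre
  simp only [Dom_getLowestM, pvDomInt, Bool.and_eq_true, decide_eq_true_eq] at hDom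
  obtain ⟨⟨⟨ha1, hb1⟩, hk1⟩, hn1⟩ := hDom
  have hK : 0 < |k| := abs_pos.mpr hk0
  have hKb : |k| ≤ 2147483648 := abs_le.mpr ⟨hk1.1, hk1.2⟩
  obtain ⟨hg, hgb, hgK, hbez⟩ := xgcd_props b |k| hK
  have hga : (pvXg b |k|).1 ∣ a := by
    have h1 : (pvXg b |k|).1 ∣ k := (dvd_abs _ _).mp hgK
    have h2 : (pvXg b |k|).1.natAbs ∣ Int.gcd b k :=
      Nat.dvd_gcd (Int.natAbs_dvd_natAbs.mpr hgb) (Int.natAbs_dvd_natAbs.mpr h1)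
    have h3 : ((pvXg b |k|).1.natAbs : Int) ∣ (Int.gcd b k : Int) :=
      Int.natCast_dvd_natCast.mpr h2
    exact dvd_trans (Int.natAbs_dvd.mp h3) hgcd
  have hnb : n ≤ 2147483649 := by omega
  obtain ⟨hPd, hm0le, hsle, hsqhi, hsolhi, hminhi, hbound⟩ := pvMhi_props a b |k| n hK hga hnb
  obtain ⟨hm01, hm0P⟩ := pvM0_bounds a b |k| hK
  have hP := pvP_pos b |k| hK
  have hmhi1 : 1 ≤ pvMhi a b |k| n := le_trans hm01 hm0le
  have hcast : pvMhi a b |k| n - (((pvMhi a b |k| n - 1).toNat : Nat) : Int) = 1 := by omega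
  have hrun := loopA_run a b |k| n cp (pvMhi a b |k| n) hK hsolhi hsqhi hminhi
      (pvMhi a b |k| n - 1).toNat (2 ^ 33) [] (by omega) (by omega)
  rw [hcast] at hrun
  simp only [List.nil_append] at hrun
  simp only [getLowestM, getLowestM_alt]
  rw [hrun, min?_eq_foldl_minStep, List.foldl_append]
  have hpair : (belowList a b |k| n cp (pvMhi a b |k| n)
      (pvMhi a b |k| n - 1).toNat).Pairwise (fun p q : Int × Int => q.2 < p.2) := by
    refine List.Pairwise.imp_of_mem ?_ (belowList_pairwise a b |k| n cp _ _)
    intro x y hx hy hlt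
    obtain ⟨hxs, hxl, hxu, hxv, -⟩ := belowList_mem a b |k| n cp _ _ x hx
    obtain ⟨hys, hyl, hyu, hyv, -⟩ := belowList_mem a b |k| n cp _ _ y hy
    have hx1 : 1 ≤ x.1 := by omega
    have hy1 : 1 ≤ y.1 := by omega
    have hxn := hminhi x.1 hx1 hxs hxu
    have hyn := hminhi y.1 hy1 hys hyu
    rw [hxv, hyv, abs_of_neg (by linarith : x.1 * x.1 - n < 0),
      abs_of_neg (by linarith : y.1 * y.1 - n < 0)]
    have hxy : x.1 * x.1 < y.1 * y.1 := by nlinarith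
    linarith
  rw [foldl_minStep_strict _ hpair]
  by_cases hcp : cp = true
  · subst hcp
    rw [belowList_cp_true]
    simp [minStep]
  · have hcp' : cp = false := by cases cp with | false => rfl | true => exact absurd rfl hcp
    subst hcp'
    by_cases hm0e : pvM0 a b |k| = pvMhi a b |k| n
    · have hemp : belowList a b |k| n false (pvMhi a b |k| n)
          (pvMhi a b |k| n - 1).toNat = [] := by
        rw [List.eq_nil_iff_forall_not_mem]
        intro p hp
        obtain ⟨hps, hpl, hpu, -, -⟩ := belowList_mem a b |k| n false _ _ p hp
        have := pvM0_least a b |k| hK hga p.1 (by omega) hps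
        omega
      rw [hemp]
      have hbeq : (pvMhi a b |k| n == pvM0 a b |k|) = true := by
        rw [beq_iff_eq]; exact hm0e.symm
      rw [hbeq]
      simp [minStep]
    · have hm0lt : pvM0 a b |k| < pvMhi a b |k| n := lt_of_le_of_ne hm0le hm0e
      have hgap : pvP b |k| ≤ pvMhi a b |k| n - pvM0 a b |k| := Int.le_of_dvd (by omega) hPd
      have hsollo : |k| ∣ a + b * (pvMhi a b |k| n - pvP b |k|) :=
        sol_shift a b |k| hK (pvMhi a b |k| n) _ hsolhi ⟨-1, by ring⟩
      have hnos : ∀ m, |k| ∣ a + b * m → pvMhi a b |k| n - pvP b |k| < m →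
          m < pvMhi a b |k| n → False := by
        intro m hmsol hl hu
        have hspc := sol_spacing a b |k| hK (pvMhi a b |k| n) m hsolhi hmsol
        have := Int.le_of_dvd (by omega) hspc
        omega
      have hlast := belowList_getLast? a b |k| n false (pvMhi a b |k| n)
          (pvMhi a b |k| n - pvP b |k|) hsollo rfl (by omega) hnos
          (pvMhi a b |k| n - 1).toNat (by omega)
      rw [hlast]
      have hlon := hminhi (pvMhi a b |k| n - pvP b |k|) (by omega) hsollo (by omega)
      have hvlo : |(pvMhi a b |k| n - pvP b |k|) * (pvMhi a b |k| n - pvP b |k|) - n| =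
          n - (pvMhi a b |k| n - pvP b |k|) * (pvMhi a b |k| n - pvP b |k|) := by
        rw [abs_of_neg (by linarith)]; ring
      have hvhi : |pvMhi a b |k| n * pvMhi a b |k| n - n| =
          pvMhi a b |k| n * pvMhi a b |k| n - n := abs_of_nonneg (by linarith)
      have hbne : (pvMhi a b |k| n == pvM0 a b |k|) = false := by
        rw [beq_eq_false_iff_ne]
        exact fun h => hm0e h.symm
      rw [hbne]
      simp only [List.foldl_cons, List.foldl_nil, minStep, hvlo, hvhi,
        Bool.false_or, Bool.or_false]
      split_ifs with h1 h2 h3 <;> simp_all <;> linarith
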